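-- pv_equiv track=rewrite | github.com/bulbulator228/prigramirovanie | maxOlenKonskayaZalupa/vyz/день 13.py | task_6_59
-- ===== SOURCE A (Python) =====
-- def task_6_59(number):
--     s = str(number)
--     min_digit = min(s)
--     count = 0
--     # Два цикла
--     for ch in s:
--         if ch == min_digit:
--             count += 1
--     return count
-- ===== SOURCE B (Python) =====
-- def task_6_59(number):
--     freq = {}
--     for ch in str(number):
--         freq[ch] = freq.get(ch, 0) + 1
--     return freq[min(freq)]
-- ===== Notes on version B (the rewrite author's own statement) =====
-- stated objective: idiomatic
-- what changed: B builds a complete character-frequency table in one pass over str(number) and returns the entry at the minimum key, instead of A's targeted min pass plus a separate counting loop with a single running tally.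
import Mathlib
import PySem

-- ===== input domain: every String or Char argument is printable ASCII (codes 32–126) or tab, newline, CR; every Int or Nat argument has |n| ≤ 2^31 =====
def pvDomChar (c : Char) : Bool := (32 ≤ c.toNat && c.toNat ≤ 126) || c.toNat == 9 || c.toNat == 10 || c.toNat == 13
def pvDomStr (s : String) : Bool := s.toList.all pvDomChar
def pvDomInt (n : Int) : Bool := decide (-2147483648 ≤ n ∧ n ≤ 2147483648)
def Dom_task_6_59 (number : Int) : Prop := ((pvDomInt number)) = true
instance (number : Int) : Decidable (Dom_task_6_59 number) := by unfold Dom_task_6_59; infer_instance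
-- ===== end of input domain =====

-- B builds a full character-frequency table over str(number) in one pass and returns the
-- entry at the minimum key, instead of A's min pass plus a separate counting tally (idiomatic).


-- ===== PORT A =====
-- s = str(number); min_digit = min(s); loop counting ch == min_digit.
-- (min("") would raise ValueError, but str(number) is never empty, so the none branch is unreachable.)
def task_6_59 (number : Int) : Int :=
  let s := (PySem.Int.toStr number).toList
  match PySem.List.min? s (fun c => c) with
  | none => 0
  | some min_digit => s.foldl (fun count ch => if ch == min_digit then count + 1 else count) 0

-- ===== PORT B =====
-- freq built with freq[ch] = freq.get(ch, 0) + 1; result is freq[min(freq)] (min over the keys).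
def task_6_59_alt (number : Int) : Int :=
  let s := (PySem.Int.toStr number).toList
  let freq := s.foldl (fun d ch => d.insert ch (d.getD ch 0 + 1)) PySem.Dict.empty
  match PySem.List.min? freq.keys (fun c => c) with
  | none => 0
  | some m => freq.getD m 0

-- ===== PRECONDITION & SPEC =====
def Spec_task_6_59 (number : Int) (out : Int) : Prop := out = task_6_59_alt number
instance (number : Int) (out : Int) : Decidable (Spec_task_6_59 number out) := by unfold Spec_task_6_59; infer_instance

-- ===== CLAIM (what is proved, stated in full; the proofs are below) =====
def Claim_equal_task_6_59 : Prop := ∀ (number : Int), Dom_task_6_59 number → Spec_task_6_59 number (task_6_59 number)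

-- ===== LEMMAS AND PROOFS =====

-- A's counting loop is List.count.
lemma count_loop (m : Char) (s : List Char) (acc : Int) :
    s.foldl (fun count ch => if ch == m then count + 1 else count) acc
      = acc + (s.count m : Int) := by
  induction s generalizing acc with
  | nil => simp
  | cons h t ih =>
    by_cases h' : h = m
    · subst h'
      simp only [List.foldl, beq_self_eq_true, if_true, ih, List.count_cons, beq_self_eq_true]
      push_cast; ring
    · have e1 : (h == m) = false := by simp [h']
      have e2 : (m == h) = false := by simp [Ne.symm h']
      simp only [List.foldl_cons, e1, Bool.false_eq_true, if_false, ih, List.count_cons]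
      simp

-- min over the distinct elements equals min over the whole list.
lemma min_dedup (s : List Char) :
    PySem.List.min? (PySem.Set.ofList s) (fun c => c) = PySem.List.min? s (fun c => c) := by
  rcases s with _ | ⟨a, t⟩
  · rfl
  · have hne : PySem.Set.ofList (a :: t) ≠ [] := by
      intro h
      have ha : a ∈ PySem.Set.ofList (a :: t) := by rw [PySem.Set.mem_ofList]; simp
      rw [h] at ha; simp at ha
    rcases h1 : PySem.List.min? (PySem.Set.ofList (a :: t)) (fun c => c) with _ | m1
    · exact absurd (Iff.mp (PySem.List.min?_eq_none_iff _ _) h1) hne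
    · rcases h2 : PySem.List.min? (a :: t) (fun c => c) with _ | m2
      · have := Iff.mp (PySem.List.min?_eq_none_iff _ _) h2; simp at this
      · have hm1 : m1 ∈ (a :: t) := by
          have := PySem.List.min?_mem h1
          rwa [PySem.Set.mem_ofList] at this
        have hm2 : m2 ∈ PySem.Set.ofList (a :: t) := by
          rw [PySem.Set.mem_ofList]; exact PySem.List.min?_mem h2
        have h12 : m1 ≤ m2 := PySem.List.min?_isMin h1 m2 hm2
        have h21 : m2 ≤ m1 := PySem.List.min?_isMin h2 m1 hm1
        exact congrArg some (le_antisymm h12 h21)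

-- ===== VERDICT (by name: the statement is the Claim_ definition above) =====
theorem task_6_59_spec : Claim_equal_task_6_59 := by
  intro number _
  unfold Spec_task_6_59 task_6_59 task_6_59_alt
  simp only [PySem.Dict.foldl_insert_getD_add_one_eq_counter, PySem.Dict.keys_counter, min_dedup]
  rcases h : PySem.List.min? (PySem.Int.toStr number).toList (fun c => c) with _ | m
  · rfl
  · simp only [PySem.Dict.getD_counter]
    rw [count_loop]
    simp
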